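-- pv_equiv track=rewrite | github.com/MrPaarrot1221/MinecraftPluginAutoMaker | ai_manager.py | compare_main_class_code
-- ===== SOURCE A (Python) =====
-- from typing import List, Dict, Optional
--
-- def compare_main_class_code(existing_code: str, new_code: str) -> List[str]:
--     """Compare existing main class with new code to identify additions"""
--     existing_lines = set(line.strip() for line in existing_code.split('\n'))
--     new_lines = [line.strip() for line in new_code.split('\n')]
--
--     # Find new code blocks
--     new_code_blocks = []
--     current_block = []
--
--     for line in new_lines:
--         if line and line not in existing_lines:
--             current_block.append(line)
--         elif current_block:
--             if any(line.strip() for line in current_block):  # Only add non-empty blocks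
--                 new_code_blocks.append('\n'.join(current_block))
--             current_block = []
--
--     # Add final block if exists
--     if current_block and any(line.strip() for line in current_block):
--         new_code_blocks.append('\n'.join(current_block))
--
--     return new_code_blocks
-- ===== SOURCE B (Python) =====
-- def compare_main_class_code(existing_code: str, new_code: str):
--     """Collect maximal runs of non-empty stripped lines of new_code that are
--     absent from existing_code's stripped lines, each run joined with '\n'."""
--     existing = {l.strip() for l in existing_code.split('\n')}
--     lines = [l.strip() for l in new_code.split('\n')]
--
--     def is_new(l):
--         return bool(l) and l not in existing
--
--     blocks = []
--     rest = lines
--     while rest: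
--         if is_new(rest[0]):
--             k = 1
--             while k < len(rest) and is_new(rest[k]):
--                 k += 1
--             blocks.append('\n'.join(rest[:k]))
--             rest = rest[k:]
--         else:
--             rest = rest[1:]
--     return blocks
-- ===== Notes on version B (the rewrite author's own statement) =====
-- stated objective: simpler
-- what changed: Replaces A's state-machine fold (blocks + current_block accumulator with flush-on-boundary and a redundant any()-non-empty guard) by direct run-grouping: scan for each maximal run of new non-empty lines and join it in one step.
import Mathlib
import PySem

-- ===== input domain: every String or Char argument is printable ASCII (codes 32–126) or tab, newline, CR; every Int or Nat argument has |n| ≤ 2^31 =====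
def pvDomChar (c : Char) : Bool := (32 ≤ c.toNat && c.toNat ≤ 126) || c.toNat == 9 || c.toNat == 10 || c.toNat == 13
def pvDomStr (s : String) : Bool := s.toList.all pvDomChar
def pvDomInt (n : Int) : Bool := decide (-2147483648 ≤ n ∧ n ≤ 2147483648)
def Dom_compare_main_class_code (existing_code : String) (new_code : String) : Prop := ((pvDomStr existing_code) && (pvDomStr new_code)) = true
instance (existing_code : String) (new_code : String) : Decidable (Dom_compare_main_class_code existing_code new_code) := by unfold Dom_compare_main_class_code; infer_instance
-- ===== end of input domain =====

-- B replaces A's state-machine fold (pending-block accumulator, flush on boundary, redundant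
-- any()-non-empty guard) with direct run-grouping over maximal runs of new non-empty lines (simpler).

-- ===== PORT A =====
-- one body of A's for-loop: state = (new_code_blocks, current_block)
def pvStepA (existing_lines : PySem.Set String) (st : List String × List String)
    (line : String) : List String × List String :=
  if !(line == "") && !(PySem.Set.contains existing_lines line) then
    (st.1, st.2 ++ [line])
  else if st.2 ≠ [] then
    (if st.2.any (fun l => !(PySem.Str.strip l == "")) then
       st.1 ++ [PySem.Str.join "\n" st.2]
     else st.1, [])
  else st

-- A's trailing "add final block if exists"
def pvFinA (st : List String × List String) : List String :=
  if st.2 ≠ [] ∧ st.2.any (fun l => !(PySem.Str.strip l == "")) = true then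
    st.1 ++ [PySem.Str.join "\n" st.2]
  else st.1

def compare_main_class_code (existing_code : String) (new_code : String) : List String :=
  let existing_lines : PySem.Set String :=
    PySem.Set.ofList (((PySem.Str.split? existing_code "\n").getD []).map
      (fun line => PySem.Str.strip line))
  let new_lines : List String :=
    ((PySem.Str.split? new_code "\n").getD []).map (fun line => PySem.Str.strip line)
  pvFinA (new_lines.foldl (pvStepA existing_lines) ([], []))

-- ===== PORT B =====
def pvIsNew (existing : PySem.Set String) (l : String) : Bool :=
  !(l == "") && !(PySem.Set.contains existing l)

-- Source B's outer while over the remaining suffix; the inner while collecting rest[:k]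
-- is the maximal pvIsNew-prefix (head :: takeWhile), rest[k:] its dropWhile remainder.
def pvBlocks (existing : PySem.Set String) : List String → List String
  | [] => []
  | l :: rest =>
    if pvIsNew existing l then
      PySem.Str.join "\n" (l :: rest.takeWhile (pvIsNew existing)) ::
        pvBlocks existing (rest.dropWhile (pvIsNew existing))
    else
      pvBlocks existing rest
termination_by ls => ls.length
decreasing_by
  · exact Nat.lt_succ_of_le (List.length_dropWhile_le _ _)
  · exact Nat.lt_succ_self _

def compare_main_class_code_alt (existing_code : String) (new_code : String) : List String :=
  let existing : PySem.Set String :=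
    PySem.Set.ofList (((PySem.Str.split? existing_code "\n").getD []).map
      (fun l => PySem.Str.strip l))
  let lines : List String :=
    ((PySem.Str.split? new_code "\n").getD []).map (fun l => PySem.Str.strip l)
  pvBlocks existing lines

-- ===== PRECONDITION & SPEC =====
def Spec_compare_main_class_code (existing_code : String) (new_code : String) (out : List String) : Prop := out = compare_main_class_code_alt existing_code new_code
instance (existing_code : String) (new_code : String) (out : List String) : Decidable (Spec_compare_main_class_code existing_code new_code out) := by unfold Spec_compare_main_class_code; infer_instance

-- ===== CLAIM (what is proved, stated in full; the proofs are below) =====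
def Claim_equal_compare_main_class_code : Prop := ∀ (existing_code : String) (new_code : String), Dom_compare_main_class_code existing_code new_code → Spec_compare_main_class_code existing_code new_code (compare_main_class_code existing_code new_code)

-- ===== LEMMAS AND PROOFS =====

-- Python's str.strip is idempotent (needed: A's lines are already stripped).
theorem pv_chars_strip_idem (cs : List Char) :
    PySem.Chars.strip (PySem.Chars.strip cs) = PySem.Chars.strip cs := by
  unfold PySem.Chars.strip PySem.Chars.rstrip PySem.Chars.lstrip
  set p := PySem.Chars.isspace with hp
  set u := List.dropWhile p cs with hu
  set v := List.dropWhile p u.reverse with hv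
  have hpre : v.reverse <+: u := by
    have h1 : v <:+ u.reverse := by rw [hv]; exact List.dropWhile_suffix p
    have := List.reverse_prefix.mpr h1
    simpa using this
  have hvrev : List.dropWhile p v.reverse = v.reverse := by
    apply List.dropWhile_eq_self_iff.mpr
    intro hl
    have hlen : 0 < u.length := lt_of_lt_of_le hl hpre.length_le
    have hg : v.reverse[0]'hl = u[0]'hlen := hpre.getElem hl
    have h0 : ¬ p (u[0]'hlen) = true := by
      have hne : u ≠ [] := List.ne_nil_of_length_pos hlen
      have := List.head_dropWhile_not p (l := cs) (hu ▸ hne)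
      rw [List.head_eq_getElem] at this
      simp only [← hu] at this
      simp [this]
    rw [hg]; exact h0
  rw [hvrev, List.reverse_reverse]
  rw [hv, List.dropWhile_idempotent]

theorem pv_strip_idem (s : String) :
    PySem.Str.strip (PySem.Str.strip s) = PySem.Str.strip s := by
  simp [PySem.Str.strip, pv_chars_strip_idem]

-- a stripped nonempty line passes A's any() guard
theorem pv_guard_true (cur : List String) (l : String) (hl : l ∈ cur)
    (hne : l ≠ "") (hs : PySem.Str.strip l = l) :
    cur.any (fun l => !(PySem.Str.strip l == "")) = true := by
  refine List.any_eq_true.mpr ⟨l, hl, ?_⟩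
  simp [hs, hne]

-- the run-grouped description of A's fold
theorem pv_fold_eq (ex : PySem.Set String) (ls : List String) :
    ∀ (bs cur : List String),
      (∀ l ∈ cur, pvIsNew ex l = true) →
      (∀ l ∈ cur ++ ls, PySem.Str.strip l = l) →
      pvFinA (ls.foldl (pvStepA ex) (bs, cur)) =
        bs ++ (if cur = [] then pvBlocks ex ls
               else PySem.Str.join "\n" (cur ++ ls.takeWhile (pvIsNew ex)) ::
                      pvBlocks ex (ls.dropWhile (pvIsNew ex))) := by
  induction ls with
  | nil =>
    intro bs cur hcur hstr
    rcases hc : cur with _ | ⟨x, xs⟩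
    · simp [pvFinA, pvBlocks]
    · have hx : pvIsNew ex x = true := hcur x (by simp [hc])
      have hxne : x ≠ "" := by
        by_contra hh
        simp [pvIsNew, hh] at hx
      have hguard := pv_guard_true cur x (by simp [hc]) hxne
        (hstr x (by simp [hc]))
      rw [← hc]
      simp [pvFinA, hc ▸ hguard, hc, pvBlocks]
  | cons l ls ih =>
    intro bs cur hcur hstr
    have hsl : PySem.Str.strip l = l := hstr l (by simp)
    by_cases hp : pvIsNew ex l = true
    · have hstep : pvStepA ex (bs, cur) l = (bs, cur ++ [l]) := by
        simp only [pvStepA, pvIsNew] at hp ⊢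
        rw [if_pos hp]
      rw [List.foldl_cons, hstep,
        ih bs (cur ++ [l])
          (by intro m hm; rcases List.mem_append.mp hm with h | h
              · exact hcur m h
              · simp at h; subst h; exact hp)
          (by intro m hm; apply hstr; simp at hm ⊢; tauto)]
      have hne : cur ++ [l] ≠ [] := by simp
      rcases hc : cur with _ | ⟨x, xs⟩
      · simp [pvBlocks, hp]
      · rw [← hc]
        simp only [if_neg hne, if_neg (hc ▸ (List.cons_ne_nil x xs)), List.takeWhile_cons_of_pos hp,
          List.dropWhile_cons_of_pos hp]
        simp
    · have hpf : pvIsNew ex l = false := by simpa using hp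
      rcases hc : cur with _ | ⟨x, xs⟩
      · have hstep : pvStepA ex (bs, []) l = (bs, []) := by
          simp only [pvStepA, pvIsNew] at hpf ⊢
          rw [if_neg (ne_true_of_eq_false hpf)]
          simp
        subst hc
        rw [List.foldl_cons, hstep, ih bs [] (by simp) (by intro m hm; apply hstr; simp at hm ⊢; tauto)]
        simp [pvBlocks, hpf]
      · -- cur = x :: xs
        have hx : pvIsNew ex x = true := hcur x (by simp [hc])
        have hxne : x ≠ "" := by by_contra hh; simp [pvIsNew, hh] at hx
        have hguard : cur.any (fun m => !(PySem.Str.strip m == "")) = true :=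
          pv_guard_true cur x (by simp [hc]) hxne (hstr x (by simp [hc]))
        have hstep : pvStepA ex (bs, cur) l = (bs ++ [PySem.Str.join "\n" cur], []) := by
          simp only [pvStepA, pvIsNew] at hpf ⊢
          rw [if_neg (ne_true_of_eq_false hpf), if_pos (by simp [hc]), if_pos hguard]
        rw [← hc]
        rw [List.foldl_cons, hstep,
          ih (bs ++ [PySem.Str.join "\n" cur]) [] (by simp)
            (by intro m hm; apply hstr; simp at hm ⊢; tauto)]
        have : pvBlocks ex (l :: ls) = pvBlocks ex ls := by
          rw [pvBlocks]; simp [hpf]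
        rw [List.takeWhile_cons_of_neg (p := pvIsNew ex) hp,
          List.dropWhile_cons_of_neg (p := pvIsNew ex) hp, this]
        simp [hc]

-- ===== VERDICT (by name: the statement is the Claim_ definition above) =====
theorem compare_main_class_code_spec : Claim_equal_compare_main_class_code := by
  intro existing_code new_code _
  simp only [Spec_compare_main_class_code, compare_main_class_code, compare_main_class_code_alt]
  rw [pv_fold_eq _ _ [] [] (by simp)
    (by intro m hm
        simp only [List.nil_append, List.mem_map] at hm
        obtain ⟨y, _, hy⟩ := hm
        rw [← hy, pv_strip_idem])]
  simp
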